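-- pv_equiv track=rewrite | github.com/jakub-wtorek-uek/pp-kolokwium-1 | F7.py | bonus
-- ===== SOURCE A (Python) =====
-- def bonus(years):
--     if years <= 5:
--         return 100 * years
--
--     total_bonus = 500
--
--     if years <= 8:
--         return total_bonus + 200 * (years - 5)
--
--     total_bonus += 600
--     years -= 8
--
--     while years > 0:
--         total_bonus += 50
--         years -= 1
--
--     return total_bonus
-- ===== SOURCE B (Python) =====
-- def bonus(years):
--     if years <= 5:
--         return 100 * years
--     if years <= 8:
--         return 500 + 200 * (years - 5)
--     return 1100 + 50 * (years - 8)
-- ===== Notes on version B (the rewrite author's own statement) =====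
-- stated objective: faster
-- what changed: replaced the O(years) increment-by-50 while loop with a closed-form piecewise arithmetic formula
import Mathlib
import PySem

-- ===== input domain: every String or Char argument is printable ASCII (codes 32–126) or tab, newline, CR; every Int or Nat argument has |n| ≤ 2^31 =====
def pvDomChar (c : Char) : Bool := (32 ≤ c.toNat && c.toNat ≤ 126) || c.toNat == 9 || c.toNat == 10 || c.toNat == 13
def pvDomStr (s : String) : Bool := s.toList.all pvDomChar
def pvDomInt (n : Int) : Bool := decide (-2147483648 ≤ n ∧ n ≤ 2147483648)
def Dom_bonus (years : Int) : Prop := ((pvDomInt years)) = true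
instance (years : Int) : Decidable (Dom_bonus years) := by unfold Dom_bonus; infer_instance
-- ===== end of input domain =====

-- B replaces A's O(years) increment-by-50 while loop with a closed-form formula (objective: faster).

-- ===== PORT A =====
-- the while loop: while years > 0: total_bonus += 50; years -= 1
def bonusLoop (total_bonus : Int) (years : Int) : Int :=
  if years > 0 then bonusLoop (total_bonus + 50) (years - 1) else total_bonus
termination_by years.toNat
decreasing_by omega

def bonus (years : Int) : Int :=
  if years ≤ 5 then 100 * years
  else
    let total_bonus : Int := 500
    if years ≤ 8 then total_bonus + 200 * (years - 5)
    else bonusLoop (total_bonus + 600) (years - 8)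

-- ===== PORT B =====
def bonus_alt (years : Int) : Int :=
  if years ≤ 5 then 100 * years
  else if years ≤ 8 then 500 + 200 * (years - 5)
  else 1100 + 50 * (years - 8)

-- ===== PRECONDITION & SPEC =====
def Spec_bonus (years : Int) (out : Int) : Prop := out = bonus_alt years
instance (years : Int) (out : Int) : Decidable (Spec_bonus years out) := by unfold Spec_bonus; infer_instance

-- ===== CLAIM (what is proved, stated in full; the proofs are below) =====
def Claim_equal_bonus : Prop := ∀ (years : Int), Dom_bonus years → Spec_bonus years (bonus years)

-- ===== LEMMAS AND PROOFS =====
theorem bonusLoop_eq (total_bonus years : Int) (h : 0 ≤ years) :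
    bonusLoop total_bonus years = total_bonus + 50 * years := by
  induction years, h using Int.le_induction generalizing total_bonus with
  | base => simp [bonusLoop]
  | succ n hn ih =>
      rw [bonusLoop, if_pos (by omega), show n + 1 - 1 = n from by ring, ih (total_bonus + 50)]
      ring

-- ===== VERDICT (by name: the statement is the Claim_ definition above) =====
theorem bonus_spec : Claim_equal_bonus := by
  intro years _
  unfold Spec_bonus bonus bonus_alt
  split_ifs with h1 h2
  · rfl
  · rfl
  · rw [bonusLoop_eq _ _ (by omega)]; ring
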